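-- pv_equiv track=rewrite | github.com/quipucords/quipucords | quipucords/fingerprinter/jboss_eap.py | version_aware_dedup
-- ===== SOURCE A (Python) =====
-- import bisect
--
-- def version_aware_dedup(versions):
--     """Deduplicate a list of version numbers of different precisions.
--
--     If versions contains '7.0.0' and '7.0', this function will return
--     a single entry for '7.0.0'.
--
--     :param versions: an iterable of version strings
--     :returns: a deduplicated set of version strings
--     """
--     in_order = sorted(versions)
--     deduped = set()
--
--     for version in in_order:
--         i = bisect.bisect_right(in_order, version)
--         # i is the first index in in_order after the index of
--         # version. If there are entries in in_order that have version
--         # as a prefix but are more specific, they should be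
--         # immediately to the right of version. Meaning that if there
--         # is one at all, then there should be one at index i.
--         if i < len(in_order) and in_order[i].startswith(version):
--             continue
--         deduped.add(version)
--
--     return deduped
-- ===== SOURCE B (Python) =====
-- def version_aware_dedup(versions):
--     """Deduplicate a list of version numbers of different precisions.
--
--     A version is dropped exactly when it is a proper prefix (raw string
--     prefix, as in the original) of some other version: collect every
--     proper prefix of every version once, then keep the versions that are
--     not in that set.
--     """
--     vs = sorted(set(versions))
--     absorbed = {u[:k] for u in vs for k in range(len(u))}
--     return {v for v in vs if v not in absorbed}
-- ===== Notes on version B (the rewrite author's own statement) =====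
-- stated objective: simpler
-- what changed: Replaced the per-element bisect_right probe of the sorted list by a one-shot set of all proper string prefixes of the versions, keeping exactly the versions not in that set; no bisect, no neighbour-index arithmetic.
import Mathlib
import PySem

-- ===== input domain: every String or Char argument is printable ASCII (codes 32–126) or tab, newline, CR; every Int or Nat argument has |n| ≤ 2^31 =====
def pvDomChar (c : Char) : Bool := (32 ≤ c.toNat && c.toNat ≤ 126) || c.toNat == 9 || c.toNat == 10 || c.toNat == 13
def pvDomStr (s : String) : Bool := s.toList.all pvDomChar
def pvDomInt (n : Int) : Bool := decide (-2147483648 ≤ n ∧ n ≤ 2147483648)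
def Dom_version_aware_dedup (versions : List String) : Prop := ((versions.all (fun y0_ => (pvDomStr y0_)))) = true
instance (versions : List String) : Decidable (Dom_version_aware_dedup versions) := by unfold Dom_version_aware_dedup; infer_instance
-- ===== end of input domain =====

-- B drops the sort+bisect neighbour test for a direct pairwise prefix scan (objective: simpler); same return value.

-- ===== PORT A =====
-- sorted(versions); for each version, bisect_right then look at the entry to its right.
def version_aware_dedup (versions : List String) : List String :=
  let in_order := PySem.List.sorted versions (fun v => v)
  in_order.foldl
    (fun deduped version =>
      let i := PySem.List.bisectRight in_order version
      if h : i < in_order.length then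
        if PySem.Str.startswith in_order[i] version then deduped
        else PySem.Set.add deduped version
      else PySem.Set.add deduped version)
    PySem.Set.empty

-- ===== PORT B =====
-- vs = sorted(set(versions)); absorbed = {u[:k] for u in vs for k in range(len(u))};
-- keep the versions of vs that are not in absorbed.
def version_aware_dedup_alt (versions : List String) : List String :=
  let vs := PySem.List.sorted (PySem.Set.ofList versions) (fun v => v)
  let absorbed := PySem.Set.ofList (vs.flatMap (fun u =>
    (PySem.List.pyRange 0 (PySem.Str.len u) 1).map
      (fun k => PySem.Str.slice u none (some k))))
  PySem.Set.ofList (vs.filter (fun v => !(PySem.Set.contains absorbed v)))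

-- ===== PRECONDITION & SPEC =====
def Spec_version_aware_dedup (versions : List String) (out : List String) : Prop := out = version_aware_dedup_alt versions
instance (versions : List String) (out : List String) : Decidable (Spec_version_aware_dedup versions out) := by unfold Spec_version_aware_dedup; infer_instance

-- ===== CLAIM (what is proved, stated in full; the proofs are below) =====
def Claim_equal_version_aware_dedup : Prop := ∀ (versions : List String), Dom_version_aware_dedup versions → Spec_version_aware_dedup versions (version_aware_dedup versions)

-- ===== LEMMAS AND PROOFS =====

-- A lexicographic sandwich a < b < c with a a prefix of c forces a to be a prefix of b.
theorem pv_lex_prefix_sandwich {a b c : List Char}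
    (hab : List.Lex (· < ·) a b) (hbc : List.Lex (· < ·) b c)
    (hac : a <+: c) : a <+: b := by
  induction hab generalizing c with
  | nil => exact List.nil_prefix
  | @cons x as bs hlex ih =>
    cases hbc with
    | cons h' =>
      obtain ⟨-, h''⟩ := List.cons_prefix_cons.mp hac
      exact List.cons_prefix_cons.mpr ⟨rfl, ih h' h''⟩
    | rel h' =>
      obtain ⟨rfl, h''⟩ := List.cons_prefix_cons.mp hac
      exact absurd h' (lt_irrefl _)
  | @rel x y as bs hxy =>
    cases hbc with
    | cons h' =>
      obtain ⟨rfl, h''⟩ := List.cons_prefix_cons.mp hac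
      exact absurd hxy (lt_irrefl _)
    | rel h' =>
      obtain ⟨rfl, h''⟩ := List.cons_prefix_cons.mp hac
      exact absurd h' (lt_asymm hxy)

-- A proper prefix is lexicographically smaller.
theorem pv_lex_of_prefix_ne {a b : List Char} (h : a <+: b) (hne : a ≠ b) :
    List.Lex (· < ·) a b := by
  induction a generalizing b with
  | nil =>
    cases b with
    | nil => exact absurd rfl hne
    | cons y bs => exact List.Lex.nil
  | cons x as ih =>
    cases b with
    | nil => exact absurd (List.prefix_nil.mp h) (List.cons_ne_nil _ _)
    | cons y bs =>
      obtain ⟨rfl, h'⟩ := List.cons_prefix_cons.mp h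
      exact List.Lex.cons (ih h' (fun e => hne (by rw [e])))

theorem pv_str_lt_of_prefix_ne {v u : String} (h : v.toList <+: u.toList) (hne : v ≠ u) : v < u := by
  refine String.lt_iff_toList_lt.mpr ?_
  exact (List.lt_iff_lex_lt _ _).mpr
    (pv_lex_of_prefix_ne h (fun e => hne (String.toList_inj.mp e)))

-- Pairwise (≤) gives index monotonicity.
theorem pv_getElem_mono {L : List String} (hs : L.Pairwise (· ≤ ·)) {i j : ℕ}
    (hij : i ≤ j) (hj : j < L.length) : L[i]'(lt_of_le_of_lt hij hj) ≤ L[j] := by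
  rcases lt_or_eq_of_le hij with h | h
  · exact (List.pairwise_iff_getElem.mp hs) i j _ hj h
  · subst h; exact le_refl _

-- The library's bisectRight loop spec, restated for String (the library states it for Int only).
theorem pv_bisectRightLoop_spec (xs : List String) (x : String)
    (hs : List.Pairwise (· ≤ ·) xs) :
    ∀ (fuel lo hi : ℕ), lo ≤ hi → hi ≤ xs.length → hi - lo ≤ fuel →
      (∀ j (hj : j < xs.length), j < lo → xs[j] ≤ x) →
      (∀ j (hj : j < xs.length), hi ≤ j → x < xs[j]) →
      lo ≤ PySem.List.bisectRightLoop xs x fuel lo hi ∧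
      PySem.List.bisectRightLoop xs x fuel lo hi ≤ hi ∧
      (∀ j (hj : j < xs.length), j < PySem.List.bisectRightLoop xs x fuel lo hi → xs[j] ≤ x) ∧
      (∀ j (hj : j < xs.length), PySem.List.bisectRightLoop xs x fuel lo hi ≤ j → x < xs[j]) := by
  intro fuel
  induction fuel with
  | zero =>
    intro lo hi h1 h2 h3 hlow hhigh
    have : lo = hi := by omega
    subst this
    rw [PySem.List.bisectRightLoop.eq_1]
    exact ⟨le_refl _, le_refl _, hlow, hhigh⟩
  | succ fuel ih =>
    intro lo hi h1 h2 h3 hlow hhigh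
    by_cases hlt : lo < hi
    · have hmidlt : (lo + hi) / 2 < xs.length := by omega
      have hred : PySem.List.bisectRightLoop xs x (fuel + 1) lo hi =
          if x < xs[(lo + hi) / 2] then PySem.List.bisectRightLoop xs x fuel lo ((lo + hi) / 2)
          else PySem.List.bisectRightLoop xs x fuel ((lo + hi) / 2 + 1) hi := by
        rw [PySem.List.bisectRightLoop.eq_2, if_pos hlt, List.getElem?_eq_getElem hmidlt]
      rw [hred]
      by_cases hx : x < xs[(lo + hi) / 2]
      · rw [if_pos hx]
        exact (ih lo ((lo + hi) / 2) (by omega) (by omega) (by omega) hlow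
          (fun j hj hij => lt_of_lt_of_le hx (pv_getElem_mono hs hij hj))).imp
          id (fun h => ⟨le_trans h.1 (by omega), h.2⟩)
      · rw [if_neg hx]
        exact (ih ((lo + hi) / 2 + 1) hi (by omega) h2 (by omega)
          (fun j hj hij => le_trans (pv_getElem_mono hs (by omega) hmidlt) (not_lt.mp hx))
          hhigh).imp (fun h => le_trans (by omega) h) id
    · rw [PySem.List.bisectRightLoop.eq_2, if_neg hlt]
      have : lo = hi := by omega
      subst this
      exact ⟨le_refl _, le_refl _, hlow, hhigh⟩

theorem pv_bisectRight_spec (xs : List String) (x : String)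
    (hs : List.Pairwise (· ≤ ·) xs) :
    PySem.List.bisectRight xs x ≤ xs.length ∧
    (∀ j (hj : j < xs.length), j < PySem.List.bisectRight xs x → xs[j] ≤ x) ∧
    (∀ j (hj : j < xs.length), PySem.List.bisectRight xs x ≤ j → x < xs[j]) := by
  have h := pv_bisectRightLoop_spec xs x hs xs.length 0 xs.length (by omega) (le_refl _)
    (by omega) (by omega) (by omega)
  exact ⟨h.2.1, h.2.2.1, h.2.2.2⟩

-- The neighbour test of A equals "some other element extends version".
theorem pv_check_iff (L : List String) (hs : L.Pairwise (· ≤ ·)) (v : String) :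
    (if h : PySem.List.bisectRight L v < L.length then
        PySem.Str.startswith L[PySem.List.bisectRight L v] v = true else False)
    ↔ ∃ u ∈ L, u ≠ v ∧ PySem.Str.startswith u v = true := by
  obtain ⟨hle, hlow, hhigh⟩ := pv_bisectRight_spec L v hs
  constructor
  · intro h
    split at h
    · next hi =>
      refine ⟨L[PySem.List.bisectRight L v], List.getElem_mem _, ?_, h⟩
      exact ne_of_gt (hhigh _ hi (le_refl _))
    · exact absurd h (by simp)
  · rintro ⟨u, hu, hne, hpre⟩
    obtain ⟨j, hj, rfl⟩ := List.mem_iff_getElem.mp hu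
    have hvltu : v < L[j] := by
      refine pv_str_lt_of_prefix_ne ?_ (Ne.symm hne)
      have := (PySem.Chars.startswith_iff _ _).mp (by rw [← PySem.Str.startswith_eq]; exact hpre)
      exact this
    have hij : PySem.List.bisectRight L v ≤ j := by
      by_contra hc
      exact absurd (hlow j hj (not_le.mp hc)) (not_le.mpr hvltu)
    have hilt : PySem.List.bisectRight L v < L.length := lt_of_le_of_lt hij hj
    rw [dif_pos hilt]
    rw [PySem.Str.startswith_eq, PySem.Chars.startswith_iff]
    have hac : v.toList <+: L[j].toList := (PySem.Chars.startswith_iff _ _).mp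
      (by rw [← PySem.Str.startswith_eq]; exact hpre)
    have hab : List.Lex (· < ·) v.toList (L[PySem.List.bisectRight L v]).toList :=
      (List.lt_iff_lex_lt _ _).mp (String.lt_iff_toList_lt.mp (hhigh _ hilt (le_refl _)))
    rcases lt_or_eq_of_le (pv_getElem_mono hs hij hj) with h | h
    · exact pv_lex_prefix_sandwich hab
        ((List.lt_iff_lex_lt _ _).mp (String.lt_iff_toList_lt.mp h)) hac
    · rw [h]; exact hac

-- The kept-or-skipped predicate (shared shape of both ports).
def pvPred (M : List String) (v : String) : Bool :=
  M.any (fun u => u != v && PySem.Str.startswith u v)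

theorem pv_pred_iff (M : List String) (v : String) :
    pvPred M v = true ↔ ∃ u ∈ M, u ≠ v ∧ PySem.Str.startswith u v = true := by
  simp [pvPred, List.any_eq_true]

-- Set.ofList is a sublist of its argument.
theorem pv_ofList_sublist {α : Type} [BEq α] (xs : List α) :
    (PySem.Set.ofList xs).Sublist xs := by
  induction xs using List.reverseRecOn with
  | nil => simp [PySem.Set.ofList_nil]
  | append_singleton xs x ih =>
    rw [PySem.Set.ofList_append_singleton, PySem.Set.add]
    split
    · exact ih.trans (List.sublist_append_left _ _)
    · exact ih.append (List.Sublist.refl _)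

-- Membership in the proper-prefix set equals "some other element extends v".
theorem pv_absorbed_iff (vs : List String) (v : String) :
    (PySem.Set.contains (PySem.Set.ofList (vs.flatMap (fun u =>
        (PySem.List.pyRange 0 (PySem.Str.len u) 1).map
          (fun k => PySem.Str.slice u none (some k))))) v) = pvPred vs v := by
  rw [Bool.eq_iff_iff, pv_pred_iff, PySem.Set.contains_iff, PySem.Set.mem_ofList, List.mem_flatMap]
  constructor
  · rintro ⟨u, hu, hv⟩
    obtain ⟨k, hk, rfl⟩ := List.mem_map.mp hv
    have hk' := (PySem.List.mem_pyRange_one).mp hk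
    rw [PySem.Str.len_eq] at hk'
    have htl : (PySem.Str.slice u none (some k)).toList = u.toList.take k.toNat := by
      simp [PySem.Str.slice, PySem.Chars.slice_eq_listSlice, PySem.List.slice_to _ hk'.1]
    refine ⟨u, hu, ?_, ?_⟩
    · intro e
      have he := congrArg (fun s => s.toList.length) e
      simp only [htl, List.length_take] at he
      omega
    · rw [PySem.Str.startswith_eq, PySem.Chars.startswith_iff, htl]
      exact List.take_prefix _ _
  · rintro ⟨u, hu, hne, hpre⟩
    have hp : v.toList <+: u.toList := (PySem.Chars.startswith_iff _ _).mp
      (by rw [← PySem.Str.startswith_eq]; exact hpre)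
    have hlt : v.toList.length < u.toList.length := by
      rcases lt_or_eq_of_le hp.length_le with h | h
      · exact h
      · exact absurd (String.toList_inj.mp (hp.eq_of_length h)) (Ne.symm hne)
    refine ⟨u, hu, List.mem_map.mpr ⟨(v.toList.length : Int), ?_, ?_⟩⟩
    · rw [PySem.List.mem_pyRange_one, PySem.Str.len_eq]
      exact ⟨by positivity, by exact_mod_cast hlt⟩
    · apply String.toList_inj.mp
      rw [show (PySem.Str.slice u none (some (v.toList.length : Int))).toList
            = u.toList.take v.toList.length from by
          simp [PySem.Str.slice, PySem.Chars.slice_eq_listSlice, PySem.List.slice_to_natCast]]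
      exact (List.prefix_iff_eq_take.mp hp).symm

-- A's fold equals Set.ofList of the filtered sorted list.
theorem pv_A_eq (versions : List String) :
    version_aware_dedup versions =
      PySem.Set.ofList ((PySem.List.sorted versions (fun v => v)).filter
        (fun v => !pvPred (PySem.List.sorted versions (fun v => v)) v)) := by
  unfold version_aware_dedup
  have hs : (PySem.List.sorted versions (fun v => v)).Pairwise (· ≤ ·) :=
    PySem.List.sorted_pairwise versions (fun v => v)
  rw [PySem.Set.ofList_eq_foldl, List.foldl_filter]
  refine PySem.List.foldl_congr_mem _ _ _ _ ?_
  intro d v _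
  simp only [PySem.List.length_sorted, PySem.Str.startswith_eq]
  by_cases hp : pvPred (PySem.List.sorted versions (fun v => v)) v = true
  · have hchk := (pv_check_iff _ hs v).mpr ((pv_pred_iff _ v).mp hp)
    split at hchk
    · next hi =>
      rw [dif_pos (by simpa using hi), if_pos (by simpa [PySem.Str.startswith_eq] using hchk)]
      simp [hp]
    · exact hchk.elim
  · have hnot := fun h => hp ((pv_pred_iff _ v).mpr ((pv_check_iff _ hs v).mp h))
    by_cases hi : PySem.List.bisectRight (PySem.List.sorted versions (fun v => v)) v <
        (PySem.List.sorted versions (fun v => v)).length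
    · have hsw : ¬ PySem.Chars.startswith
          ((PySem.List.sorted versions (fun v => v))[PySem.List.bisectRight (PySem.List.sorted versions (fun v => v)) v]'hi).toList
          v.toList = true := by
        intro h
        exact hnot (by rw [dif_pos hi]; simpa [PySem.Str.startswith_eq] using h)
      rw [dif_pos (by simpa using hi), if_neg (by simpa using hsw)]
      simp [hp]
    · rw [dif_neg (by simpa using hi)]
      simp [hp]

theorem version_aware_dedup_spec_aux (versions : List String) :
    version_aware_dedup versions = version_aware_dedup_alt versions := by
  have L := PySem.List.sorted versions (fun v => v)
  set S := PySem.List.sorted (PySem.Set.ofList versions) (fun v => v) with hS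
  have hmemS : ∀ x, x ∈ S ↔ x ∈ versions := by
    intro x
    rw [hS, PySem.List.mem_sorted, PySem.Set.mem_ofList]
  have hmemL : ∀ x, x ∈ PySem.List.sorted versions (fun v => v) ↔ x ∈ versions := by
    intro x; rw [PySem.List.mem_sorted]
  have hpred : ∀ v, pvPred (PySem.List.sorted versions (fun v => v)) v = pvPred S v := by
    intro v
    rw [Bool.eq_iff_iff, pv_pred_iff, pv_pred_iff]
    constructor
    · rintro ⟨u, hu, h⟩; exact ⟨u, (hmemS u).mpr ((hmemL u).mp hu), h⟩
    · rintro ⟨u, hu, h⟩; exact ⟨u, (hmemL u).mpr ((hmemS u).mp hu), h⟩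
  have hSlt : S.Pairwise (· < ·) := by
    rw [hS]; exact PySem.List.sorted_ofList_pairwise_lt versions
  -- B's value is just the filtered S (already nodup).
  have hB : version_aware_dedup_alt versions =
      S.filter (fun v => !pvPred S v) := by
    unfold version_aware_dedup_alt
    rw [← hS]
    show PySem.Set.ofList (S.filter (fun v => !(PySem.Set.contains (PySem.Set.ofList
      (S.flatMap (fun u => (PySem.List.pyRange 0 (PySem.Str.len u) 1).map
        (fun k => PySem.Str.slice u none (some k))))) v))) = _
    rw [List.filter_congr (l := S)
      (fun v _ => by simp only [pv_absorbed_iff] : ∀ x ∈ S, _ = (fun v => !pvPred S v) x)]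
    exact PySem.Set.ofList_eq_self_of_nodup _ ((hSlt.filter _).imp (fun h => ne_of_lt h))
  rw [pv_A_eq versions, hB]
  -- Both sides: nodup, strictly sorted, same members.
  set left := PySem.Set.ofList ((PySem.List.sorted versions (fun v => v)).filter
    (fun v => !pvPred (PySem.List.sorted versions (fun v => v)) v)) with hleft
  have hleft_nodup : left.Nodup := PySem.Set.nodup_ofList _
  have hleft_le : left.Pairwise (· ≤ ·) :=
    List.Pairwise.sublist (pv_ofList_sublist _)
      ((PySem.List.sorted_pairwise versions (fun v => v)).filter _)
  have hleft_lt : left.Pairwise (· < ·) :=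
    (hleft_le.and hleft_nodup).imp (fun h => lt_of_le_of_ne h.1 h.2)
  have hright_lt : (S.filter (fun v => !pvPred S v)).Pairwise (· < ·) := hSlt.filter _
  have hright_nodup : (S.filter (fun v => !pvPred S v)).Nodup :=
    hright_lt.imp (fun h => ne_of_lt h)
  have hmem : ∀ a, a ∈ left ↔ a ∈ S.filter (fun v => !pvPred S v) := by
    intro a
    rw [hleft, PySem.Set.mem_ofList, List.mem_filter, List.mem_filter, hpred a, hmemL a, hmemS a]
  exact List.Perm.eq_of_pairwise
    (fun a b _ _ h1 h2 => absurd h2 (lt_asymm h1)) hleft_lt hright_lt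
    ((List.perm_ext_iff_of_nodup hleft_nodup hright_nodup).mpr hmem)

-- ===== VERDICT (by name: the statement is the Claim_ definition above) =====
theorem version_aware_dedup_spec : Claim_equal_version_aware_dedup := by
  intro versions _
  exact version_aware_dedup_spec_aux versions
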